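-- pv_equiv track=rewrite | github.com/rael96gh/test_env | api/app/resources/reduced_fragments.py | find_duplicate_sequences
-- ===== SOURCE A (Python) =====
-- def find_duplicate_sequences(sequences):
--     # Dictionary to store unique sequences and their first occurrence index
--     unique_sequences = {}
--     duplicates_map = {}
--
--     # Populate dictionary with unique sequences and map duplicate indices
--     for index, seq in enumerate(sequences):
--         if seq in unique_sequences:
--             # If sequence is already seen, store its duplicate index
--             duplicates_map[index] = unique_sequences[seq]
--         else:
--             # Record the first occurrence of the sequence
--             unique_sequences[seq] = index
--
--     return unique_sequences, duplicates_map
-- ===== SOURCE B (Python) =====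
-- def find_duplicate_sequences(sequences):
--     # Group every occurrence index by sequence value (keys in first-appearance order).
--     positions = {}
--     for i, seq in enumerate(sequences):
--         positions.setdefault(seq, []).append(i)
--     # First-occurrence table: the head of each group.
--     unique_sequences = {seq: idxs[0] for seq, idxs in positions.items()}
--     # Every non-first occurrence paired with its group head, reordered by index.
--     dup_pairs = [(i, idxs[0]) for idxs in positions.values() for i in idxs[1:]]
--     duplicates_map = dict(sorted(dup_pairs, key=lambda p: p[0]))
--     return unique_sequences, duplicates_map
-- ===== Notes on version B (the rewrite author's own statement) =====
-- stated objective: alternative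
-- what changed: Replaces A's single fused loop threading two dicts with a grouping algorithm: collect every occurrence index per sequence into one positions table, read the first-occurrence table off the group heads, and rebuild the duplicates map by sorting the non-first occurrences by index.
import Mathlib
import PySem

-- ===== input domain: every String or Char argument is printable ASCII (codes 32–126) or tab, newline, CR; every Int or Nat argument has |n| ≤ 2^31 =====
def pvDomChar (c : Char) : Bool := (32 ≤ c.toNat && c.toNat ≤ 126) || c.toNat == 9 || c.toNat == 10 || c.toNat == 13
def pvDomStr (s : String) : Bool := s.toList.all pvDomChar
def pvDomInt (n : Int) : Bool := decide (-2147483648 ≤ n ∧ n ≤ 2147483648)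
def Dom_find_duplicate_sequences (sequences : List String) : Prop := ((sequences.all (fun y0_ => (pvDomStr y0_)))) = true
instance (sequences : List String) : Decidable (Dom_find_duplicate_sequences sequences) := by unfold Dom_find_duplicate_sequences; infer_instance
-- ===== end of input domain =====

-- B replaces A's single fused loop (threading two dicts) by group-then-sort: group all occurrence
-- indices by sequence, read the heads off the groups, and sort the non-first occurrences by index
-- (objective: alternative; no speed claim); return values only, no mutation.

-- ===== PORT A =====
-- one fused loop over enumerate(sequences), threading both dicts
def fdsStepA (st : PySem.Dict String Int × PySem.Dict Int Int) (p : Int × String) :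
    PySem.Dict String Int × PySem.Dict Int Int :=
  if st.1.contains p.2 then
    (st.1, st.2.insert p.1 (st.1.getD p.2 0))   -- contains-guarded [] access: getD is exact here
  else
    (st.1.insert p.2 p.1, st.2)

def find_duplicate_sequences (sequences : List String) : (List (String × Int)) × (List (Int × Int)) :=
  let st := (PySem.List.enumerate sequences).foldl fdsStepA (PySem.Dict.empty, PySem.Dict.empty)
  (st.1.items, st.2.items)

-- ===== PORT B =====
-- positions.setdefault(seq, []).append(i): append i to the group of seq (new groups start empty)
def fdsGroup (d : PySem.Dict String (List Int)) (p : Int × String) : PySem.Dict String (List Int) :=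
  d.modify p.2 [] (· ++ [p.1])

def find_duplicate_sequences_alt (sequences : List String) : (List (String × Int)) × (List (Int × Int)) :=
  let positions := (PySem.List.enumerate sequences).foldl fdsGroup PySem.Dict.empty
  -- {seq: idxs[0] for seq, idxs in positions.items()}; groups are nonempty, so getD-at-0 is exact
  let unique := positions.items.foldl
    (fun u q => u.insert q.1 (PySem.List.pyGetD q.2 0 0)) PySem.Dict.empty
  -- [(i, idxs[0]) for idxs in positions.values() for i in idxs[1:]]
  let dup_pairs := positions.values.flatMap
    (fun idxs => (PySem.List.slice idxs (some 1) none).map (fun i => (i, PySem.List.pyGetD idxs 0 0)))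
  -- dict(sorted(dup_pairs, key=lambda p: p[0]))
  let duplicates := PySem.Dict.ofList (PySem.List.sorted dup_pairs (fun p => p.1))
  (unique.items, duplicates.items)

-- ===== PRECONDITION & SPEC =====
def Spec_find_duplicate_sequences (sequences : List String) (out : (List (String × Int)) × (List (Int × Int))) : Prop := out = find_duplicate_sequences_alt sequences
instance (sequences : List String) (out : (List (String × Int)) × (List (Int × Int))) : Decidable (Spec_find_duplicate_sequences sequences out) := by unfold Spec_find_duplicate_sequences; infer_instance

-- ===== CLAIM (what is proved, stated in full; the proofs are below) =====
def Claim_equal_find_duplicate_sequences : Prop := ∀ (sequences : List String), Dom_find_duplicate_sequences sequences → Spec_find_duplicate_sequences sequences (find_duplicate_sequences sequences)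

-- ===== LEMMAS AND PROOFS =====

-- proof-side mirror of A as two staged passes (used only to factor the proof)
def fdsPass1 (d : PySem.Dict String Int) (p : Int × String) : PySem.Dict String Int :=
  d.setdefault p.2 p.1

def fdsPass2 (fs : PySem.Dict String Int) (d : PySem.Dict Int Int) (p : Int × String) :
    PySem.Dict Int Int :=
  if fs.getD p.2 0 ≠ p.1 then d.insert p.1 (fs.getD p.2 0) else d

-- canonical descriptions both sides are reduced to
def fdsGrp (l : List (Int × String)) (s : String) : List Int :=
  (l.filter (fun q => q.2 == s)).map (·.1)

def fdsHead (l : List (Int × String)) (s : String) : Int :=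
  PySem.List.pyGetD (fdsGrp l s) 0 0

def fdsU (l : List (Int × String)) : List (String × Int) :=
  (PySem.Set.ofList (l.map (·.2))).map (fun s => (s, fdsHead l s))

def fdsD (l : List (Int × String)) : List (Int × Int) :=
  (l.filter (fun p => decide (fdsHead l p.2 ≠ p.1))).map (fun p => (p.1, fdsHead l p.2))

-- setdefault unfolds
theorem fds_setdefault_contains {d : PySem.Dict String Int} {s : String} {i : Int}
    (h : d.contains s = true) : d.setdefault s i = d := by
  simp [PySem.Dict.setdefault, h]

theorem fds_setdefault_not_contains {d : PySem.Dict String Int} {s : String} {i : Int}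
    (h : d.contains s = false) : d.setdefault s i = d.insert s i := by
  simp [PySem.Dict.setdefault, PySem.Dict.insert, h]

-- pass 1 never overwrites: an existing binding survives the whole pass
theorem fds_pass1_stable (pairs : List (Int × String)) (u : PySem.Dict String Int)
    {s : String} {j : Int} (h : u.get? s = some j) :
    (pairs.foldl fdsPass1 u).get? s = some j := by
  induction pairs generalizing u with
  | nil => exact h
  | cons p rest ih =>
    simp only [List.foldl_cons]
    apply ih
    by_cases hc : u.contains p.2 = true
    · rw [fdsPass1, fds_setdefault_contains hc]; exact h
    · rw [fdsPass1, fds_setdefault_not_contains (by simpa using hc)]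
      by_cases he : s = p.2
      · exfalso
        have : u.contains s = (u.get? s).isSome := PySem.Dict.contains_eq_isSome_get? u s
        rw [h] at this; subst he; simp [this] at hc
      · rw [PySem.Dict.get?_insert_of_ne u p.1 he]; exact h

-- the fused loop equals pass 1 followed by pass 2 against the final table
theorem fds_main (pairs : List (Int × String)) :
    ∀ (u : PySem.Dict String Int) (d : PySem.Dict Int Int),
    (∀ s j, u.get? s = some j → ∀ q ∈ pairs, j ≠ q.1) →
    pairs.Pairwise (fun p q => p.1 ≠ q.1) →
    pairs.foldl fdsStepA (u, d) =
      (pairs.foldl fdsPass1 u, pairs.foldl (fdsPass2 (pairs.foldl fdsPass1 u)) d) := by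
  induction pairs with
  | nil => intro u d _ _; rfl
  | cons p rest ih =>
    intro u d hinv hpw
    obtain ⟨i, s⟩ := p
    have hpw' := (List.pairwise_cons.mp hpw)
    simp only [List.foldl_cons]
    by_cases hc : u.contains s = true
    · have hsome : (u.get? s).isSome := by
        have := PySem.Dict.contains_eq_isSome_get? u s
        rw [hc] at this; exact this.symm ▸ rfl
      obtain ⟨j, hj⟩ := Option.isSome_iff_exists.mp hsome
      have hgD : u.getD s 0 = j := PySem.Dict.getD_of_get?_eq_some u 0 hj
      have hstepA : fdsStepA (u, d) (i, s) = (u, d.insert i j) := by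
        simp [fdsStepA, hc, hgD]
      have hp1 : fdsPass1 u (i, s) = u := fds_setdefault_contains hc
      rw [hstepA, hp1]
      have hinv' : ∀ s' j', u.get? s' = some j' → ∀ q ∈ rest, j' ≠ q.1 := by
        intro s' j' h q hq; exact hinv s' j' h q (List.mem_cons_of_mem _ hq)
      rw [ih u (d.insert i j) hinv' hpw'.2]
      have hfsj : (rest.foldl fdsPass1 u).getD s 0 = j :=
        PySem.Dict.getD_of_get?_eq_some _ 0 (fds_pass1_stable rest u hj)
      have hji : j ≠ i := hinv s j hj (i, s) (List.mem_cons_self)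
      have hp2 : fdsPass2 (rest.foldl fdsPass1 u) d (i, s) = d.insert i j := by
        simp [fdsPass2, hfsj, hji]
      rw [hp2]
    · have hcf : u.contains s = false := by simpa using hc
      have hstepA : fdsStepA (u, d) (i, s) = (u.insert s i, d) := by
        simp [fdsStepA, hcf]
      have hp1 : fdsPass1 u (i, s) = u.insert s i := fds_setdefault_not_contains hcf
      rw [hstepA, hp1]
      have hinv' : ∀ s' j', (u.insert s i).get? s' = some j' → ∀ q ∈ rest, j' ≠ q.1 := by
        intro s' j' h q hq
        by_cases he : s' = s
        · subst he
          rw [PySem.Dict.get?_insert_self] at h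
          cases h
          exact hpw'.1 q hq
        · rw [PySem.Dict.get?_insert_of_ne u i he] at h
          exact hinv s' j' h q (List.mem_cons_of_mem _ hq)
      rw [ih (u.insert s i) d hinv' hpw'.2]
      have hfsi : (rest.foldl fdsPass1 (u.insert s i)).getD s 0 = i :=
        PySem.Dict.getD_of_get?_eq_some _ 0
          (fds_pass1_stable rest (u.insert s i) (PySem.Dict.get?_insert_self u s i))
      have hp2 : fdsPass2 (rest.foldl fdsPass1 (u.insert s i)) d (i, s) = d := by
        simp [fdsPass2, hfsi]
      rw [hp2]

-- head of a nonempty prefix is unaffected by appending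
theorem fds_headD_append (xs ys : List Int) (h : xs ≠ []) :
    PySem.List.pyGetD (xs ++ ys) 0 0 = PySem.List.pyGetD xs 0 0 := by
  cases xs with
  | nil => exact absurd rfl h
  | cons a t =>
    have h0 : (0:Int) ≤ (t.length:Int) + ys.length := by positivity
    simp [PySem.List.pyGetD, PySem.List.pyGet?, PySem.List.pyIdx?, h0]

-- the group of s in l ++ [p]
theorem fds_grp_append (l : List (Int × String)) (p : Int × String) (s : String) :
    fdsGrp (l ++ [p]) s = fdsGrp l s ++ (if p.2 == s then [p.1] else []) := by
  simp only [fdsGrp, List.filter_append]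
  rw [List.map_append]
  congr 1
  by_cases h : p.2 == s <;> simp [h]

theorem fds_grp_ne_nil {l : List (Int × String)} {s : String} (h : s ∈ l.map (·.2)) :
    fdsGrp l s ≠ [] := by
  obtain ⟨q, hq, hqs⟩ := List.mem_map.mp h
  have : q.1 ∈ fdsGrp l s := by
    apply List.mem_map.mpr
    exact ⟨q, List.mem_filter.mpr ⟨hq, by simp [hqs]⟩, rfl⟩
  intro hnil; rw [hnil] at this; exact (List.not_mem_nil) this

theorem fds_head_append {l : List (Int × String)} (p : Int × String) {s : String}
    (h : s ∈ l.map (·.2)) : fdsHead (l ++ [p]) s = fdsHead l s := by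
  rw [fdsHead, fdsHead, fds_grp_append, fds_headD_append _ _ (fds_grp_ne_nil h)]

-- L1: pass 1 produces exactly the canonical first-occurrence table
theorem fds_grp_nil_of_not_mem {l : List (Int × String)} {s : String}
    (h : s ∉ l.map (·.2)) : fdsGrp l s = [] := by
  rw [fdsGrp, List.filter_eq_nil_iff.mpr, List.map_nil]
  intro q hq hqs
  exact h (List.mem_map.mpr ⟨q, hq, by simpa using hqs⟩)

theorem fds_pass1_items (l : List (Int × String)) :
    (l.foldl fdsPass1 PySem.Dict.empty).items = fdsU l := by
  induction l using List.reverseRecOn with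
  | nil => simp [fdsU, PySem.Set.ofList, PySem.Set.empty]; rfl
  | append_singleton l p ih =>
    rw [List.foldl_append, List.foldl_cons, List.foldl_nil]
    have hkeys : (l.foldl fdsPass1 PySem.Dict.empty).keys = PySem.Set.ofList (l.map (·.2)) := by
      show (l.foldl fdsPass1 PySem.Dict.empty).items.map (·.1) = _
      rw [ih]; simp [fdsU, List.map_map, Function.comp_def]
    have hofcons : PySem.Set.ofList ((l ++ [p]).map (·.2))
        = PySem.Set.add (PySem.Set.ofList (l.map (·.2))) p.2 := by
      rw [List.map_append]; simp [PySem.Set.ofList, List.foldl_append]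
    by_cases hc : (l.foldl fdsPass1 PySem.Dict.empty).contains p.2 = true
    · have hmem : p.2 ∈ l.map (·.2) := by
        have h1 := (PySem.Dict.contains_iff_mem_keys _ _).mp hc
        rw [hkeys] at h1; exact (PySem.Set.mem_ofList _ _).mp h1
      rw [fdsPass1, fds_setdefault_contains hc, ih]
      have hset : PySem.Set.ofList ((l ++ [p]).map (·.2)) = PySem.Set.ofList (l.map (·.2)) := by
        rw [hofcons]
        simp [PySem.Set.add, PySem.Set.contains, (PySem.Set.mem_ofList _ _).mpr hmem]
      rw [fdsU, fdsU, hset]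
      exact (List.map_congr_left (fun s hs => by
        rw [fds_head_append p ((PySem.Set.mem_ofList _ _).mp hs)])).symm
    · have hcf : (l.foldl fdsPass1 PySem.Dict.empty).contains p.2 = false := by simpa using hc
      have hnmem : p.2 ∉ l.map (·.2) := by
        intro hm
        rw [(PySem.Dict.contains_iff_mem_keys _ _).mpr
          (hkeys ▸ (PySem.Set.mem_ofList _ _).mpr hm)] at hcf
        exact absurd hcf (by simp)
      rw [fdsPass1, fds_setdefault_not_contains hcf,
        PySem.Dict.items_insert_of_not_contains _ _ hcf, ih]
      have hset : PySem.Set.ofList ((l ++ [p]).map (·.2))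
          = PySem.Set.ofList (l.map (·.2)) ++ [p.2] := by
        rw [hofcons]
        rw [PySem.Set.add, if_neg]
        simp only [PySem.Set.contains, List.contains_iff_mem]
        intro hm; exact absurd ((PySem.Set.mem_ofList _ _).mp hm) hnmem
      rw [fdsU, fdsU, hset, List.map_append]
      congr 1
      · exact (List.map_congr_left (fun s hs => by
          rw [fds_head_append p ((PySem.Set.mem_ofList _ _).mp hs)])).symm
      · have hgrp : fdsGrp (l ++ [p]) p.2 = [p.1] := by
          rw [fds_grp_append, fds_grp_nil_of_not_mem hnmem]; simp
        simp [fdsHead, hgrp, PySem.List.pyGetD, PySem.List.pyGet?, PySem.List.pyIdx?]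

-- B's positions table
theorem fds_positions_keys (l : List (Int × String)) :
    (l.foldl fdsGroup PySem.Dict.empty).keys = PySem.Set.ofList (l.map (·.2)) := by
  have h := PySem.Dict.keys_foldl_modify_key l (fun p => p.2) ([] : List Int)
    (fun _ p => (· ++ [p.1])) PySem.Dict.empty
  simpa [fdsGroup] using h

theorem fds_positions_getD (l : List (Int × String)) (s : String) :
    (l.foldl fdsGroup PySem.Dict.empty).getD s [] = fdsGrp l s := by
  have hswap : l.foldl fdsGroup PySem.Dict.empty
      = (l.map Prod.swap).foldl (fun d p => d.modify p.1 [] (· ++ [p.2])) PySem.Dict.empty := by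
    rw [List.foldl_map]; rfl
  rw [hswap, PySem.Dict.getD_foldl_modify_append]
  simp [fdsGrp, List.filter_map, List.map_map, Function.comp_def, Prod.swap]

theorem fds_positions_nodup (l : List (Int × String)) :
    (l.foldl fdsGroup PySem.Dict.empty).keys.Nodup := by
  rw [fds_positions_keys]; exact PySem.Set.nodup_ofList _

theorem fds_positions_items (l : List (Int × String)) :
    (l.foldl fdsGroup PySem.Dict.empty).items
      = (PySem.Set.ofList (l.map (·.2))).map (fun s => (s, fdsGrp l s)) := by
  rw [PySem.Dict.items_eq_map_keys _ (fds_positions_nodup l) ([] : List Int), fds_positions_keys]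
  exact List.map_congr_left (fun s _ => by rw [fds_positions_getD])

-- L2: B's unique table has the canonical items
theorem fds_b_unique (l : List (Int × String)) :
    ((l.foldl fdsGroup PySem.Dict.empty).items.foldl
      (fun u q => u.insert q.1 (PySem.List.pyGetD q.2 0 0)) PySem.Dict.empty).items = fdsU l := by
  rw [fds_positions_items]
  have hnd : (((PySem.Set.ofList (l.map (·.2))).map (fun s => (s, fdsGrp l s))).map
      (fun q : String × List Int => q.1)).Nodup := by
    simp only [List.map_map, Function.comp_def]
    simp
  have h := PySem.Dict.items_foldl_insert_fresh
    ((PySem.Set.ofList (l.map (·.2))).map (fun s => (s, fdsGrp l s)))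
    (fun q => q.1) (fun q => PySem.List.pyGetD q.2 0 0)
    (PySem.Dict.empty (κ := String) (ν := Int))
    (by intro a _; exact PySem.Dict.contains_empty _) hnd
  rw [h]
  simp [fdsU, fdsHead, List.map_map, Function.comp_def]
  rfl

-- ofList of a list with distinct keys keeps it as items
theorem fds_ofList_items (ps : List (Int × Int)) (hnd : (ps.map (·.1)).Nodup) :
    (PySem.Dict.ofList ps).items = ps := by
  have h := PySem.Dict.items_foldl_insert_fresh ps (fun p => p.1) (fun p => p.2)
    (PySem.Dict.empty (κ := Int) (ν := Int))
    (by intro a _; exact PySem.Dict.contains_empty _) hnd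
  simpa [PySem.Dict.ofList, PySem.Dict.update] using h

-- L3: pass 2 against the pass-1 table has the canonical items
theorem fds_pass1_nodup (l : List (Int × String)) :
    (l.foldl fdsPass1 PySem.Dict.empty).keys.Nodup := by
  show ((l.foldl fdsPass1 PySem.Dict.empty).items.map (·.1)).Nodup
  rw [fds_pass1_items]
  simp only [fdsU, List.map_map, Function.comp_def]
  simp

theorem fds_pass1_getD {l : List (Int × String)} {p : Int × String} (hp : p ∈ l) :
    (l.foldl fdsPass1 PySem.Dict.empty).getD p.2 0 = fdsHead l p.2 := by
  have hmem : (p.2, fdsHead l p.2) ∈ (l.foldl fdsPass1 PySem.Dict.empty).items := by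
    rw [fds_pass1_items]
    exact List.mem_map.mpr ⟨p.2,
      (PySem.Set.mem_ofList _ _).mpr (List.mem_map.mpr ⟨p, hp, rfl⟩), rfl⟩
  exact PySem.Dict.getD_of_mem_items _ hmem (fds_pass1_nodup l) 0

theorem fds_filter_pairwise (l : List (Int × String)) (c : (Int × String) → Bool)
    (hfst : l.Pairwise (fun p q => p.1 < q.1)) :
    ((l.filter c).map (fun p => p.1)).Pairwise (· < ·) :=
  List.pairwise_map.mpr (List.Pairwise.sublist List.filter_sublist hfst)

set_option maxHeartbeats 1000000 in
theorem fds_pass2_items (l : List (Int × String)) (hfst : l.Pairwise (fun p q => p.1 < q.1)) :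
    ((l.foldl (fdsPass2 (l.foldl fdsPass1 PySem.Dict.empty)) PySem.Dict.empty)).items = fdsD l := by
  have hcongr := PySem.List.foldl_congr_mem l
    (fdsPass2 (l.foldl fdsPass1 PySem.Dict.empty))
    (fun d p => if fdsHead l p.2 ≠ p.1 then d.insert p.1 (fdsHead l p.2) else d)
    (PySem.Dict.empty (κ := Int) (ν := Int))
    (by intro acc p hp; simp only [fdsPass2, fds_pass1_getD hp])
  rw [hcongr]
  have hsplit := PySem.List.foldl_ite_eq_foldl_filter
    (fun p : Int × String => fdsHead l p.2 ≠ p.1)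
    (fun (d : PySem.Dict Int Int) (p : Int × String) => d.insert p.1 (fdsHead l p.2))
    l PySem.Dict.empty
  have hnd : ((l.filter (fun p => decide (fdsHead l p.2 ≠ p.1))).map (fun p => p.1)).Nodup :=
    (fds_filter_pairwise l _ hfst).imp ne_of_lt
  have hofl : PySem.Dict.ofList (fdsD l)
      = (l.filter (fun p => decide (fdsHead l p.2 ≠ p.1))).foldl
          (fun (d : PySem.Dict Int Int) p => d.insert p.1 (fdsHead l p.2)) PySem.Dict.empty := by
    unfold PySem.Dict.ofList PySem.Dict.update fdsD
    rw [List.foldl_map]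
  have hndD : ((fdsD l).map (fun p => p.1)).Nodup := by
    unfold fdsD; rw [List.map_map]; simpa using hnd
  exact (congrArg PySem.Dict.items hsplit).trans
    (hofl ▸ fds_ofList_items (fdsD l) hndD)

-- grouping permutation (by counting occurrences)
theorem fds_sum_ite (S : List String) (t : String) (c : Nat) (hnd : S.Nodup) :
    ((S.map (fun s => if t == s then c else 0)).sum) = if t ∈ S then c else 0 := by
  induction S with
  | nil => simp
  | cons a S ih =>
    have hnd' := (List.nodup_cons.mp hnd)
    by_cases h : t = a
    · subst h
      have hz : (List.map (fun s => if (t == s) = true then c else 0) S).sum = 0 := by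
        apply List.sum_eq_zero; intro x hx
        obtain ⟨s, hs, rfl⟩ := List.mem_map.mp hx
        rw [if_neg]; intro hts
        simp only [beq_iff_eq] at hts; subst hts; exact hnd'.1 hs
      simp only [beq_iff_eq] at hz
      simp [List.sum_cons, hz]
    · simp only [List.map_cons, List.sum_cons, List.mem_cons]
      rw [if_neg (by simpa using h), ih hnd'.2]
      simp [h]

theorem fds_perm_groups (L : List (Int × String)) (S : List String)
    (hmem : ∀ p ∈ L, p.2 ∈ S) (hnd : S.Nodup) :
    (S.flatMap (fun s => L.filter (fun p => p.2 == s))).Perm L := by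
  rw [List.perm_iff_count]
  intro a
  rw [List.count_flatMap]
  have hterm : ∀ s, List.count a (L.filter (fun p => p.2 == s)) =
      if a.2 == s then List.count a L else 0 := by
    intro s
    by_cases h : a.2 == s
    · rw [if_pos h]; exact List.count_filter h
    · rw [if_neg h, List.count_eq_zero]
      intro hmem'
      exact h (List.mem_filter.mp hmem').2
  have : (S.map (List.count a ∘ fun s => L.filter (fun p => p.2 == s))).sum =
      (S.map (fun s => if a.2 == s then List.count a L else 0)).sum := by
    apply congrArg
    exact List.map_congr_left (fun s _ => hterm s)
  rw [this]
  have := fds_sum_ite S a.2 (List.count a L) hnd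
  simp only [beq_iff_eq] at this ⊢
  rw [this]
  by_cases hc : a ∈ L
  · rw [if_pos (hmem a hc)]
  · simp [List.count_eq_zero.mpr hc]

-- L4: B's dup_pairs sorted by index is the canonical duplicates list
-- the duplicates list is strictly increasing in its keys
theorem fds_fdsD_pairwise (l : List (Int × String)) (hfst : l.Pairwise (fun p q => p.1 < q.1)) :
    (fdsD l).Pairwise (fun a b => a.1 < b.1) := by
  unfold fdsD
  exact List.pairwise_map.mpr (List.Pairwise.sublist List.filter_sublist hfst)

-- per-sequence body of B's comprehension = the cond-filtered group, mapped
theorem fds_body (l : List (Int × String)) (hfst : l.Pairwise (fun p q => p.1 < q.1))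
    {s : String} (hs : s ∈ l.map (·.2)) :
    (PySem.List.slice (fdsGrp l s) (some 1) none).map
        (fun i => (i, PySem.List.pyGetD (fdsGrp l s) 0 0))
      = (((l.filter (fun p => decide (fdsHead l p.2 ≠ p.1))).filter (fun p => p.2 == s)).map
          (fun p => (p.1, fdsHead l p.2))) := by
  rw [List.filter_comm]
  obtain ⟨G, hG⟩ : ∃ G, G = l.filter (fun p => p.2 == s) := ⟨_, rfl⟩
  rw [← hG]
  have hGpw : G.Pairwise (fun p q => p.1 < q.1) := by
    rw [hG]; exact List.Pairwise.sublist List.filter_sublist hfst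
  have hGmem : ∀ p ∈ G, p.2 = s := by
    intro p hp; rw [hG] at hp; simpa using (List.mem_filter.mp hp).2
  have hGne : G ≠ [] := by
    rw [hG]
    intro hnil
    have := fds_grp_ne_nil hs
    rw [fdsGrp, hnil] at this; simp at this
  obtain ⟨q, rest, rfl⟩ := List.exists_cons_of_ne_nil hGne
  have hgrp : fdsGrp l s = (q :: rest).map (fun p => p.1) := by rw [fdsGrp, ← hG]
  have hhead : fdsHead l s = q.1 := by
    rw [fdsHead, hgrp]
    simp [PySem.List.pyGetD, PySem.List.pyGet?, PySem.List.pyIdx?]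
  have hslice : PySem.List.slice (fdsGrp l s) (some 1) none = rest.map (fun p => p.1) := by
    rw [PySem.List.slice_from _ (by norm_num : (0:Int) ≤ 1), hgrp]
    simp
  have hq2 : q.2 = s := hGmem q List.mem_cons_self
  have hfilter : (q :: rest).filter (fun p => decide (fdsHead l p.2 ≠ p.1)) = rest := by
    rw [List.filter_cons]
    have hqfalse : decide (fdsHead l q.2 ≠ q.1) = false := by
      simp [hq2, hhead]
    rw [if_neg (by simp [hqfalse])]
    apply List.filter_eq_self.mpr
    intro p hp
    have hp2 : p.2 = s := hGmem p (List.mem_cons_of_mem _ hp)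
    have hlt : q.1 < p.1 := (List.pairwise_cons.mp hGpw).1 p hp
    simp [hp2, hhead]
    omega
  rw [hslice, hfilter, List.map_map]
  have hh : fdsHead l s = PySem.List.pyGetD (fdsGrp l s) 0 0 := rfl
  refine List.map_congr_left (fun p hp => ?_)
  have hp2 : p.2 = s := hGmem p (List.mem_cons_of_mem _ hp)
  simp [hp2, ← hh, hhead]

-- L4: B's dup_pairs sorted by index is the canonical duplicates list
theorem fds_b_dups (l : List (Int × String)) (hfst : l.Pairwise (fun p q => p.1 < q.1)) :
    PySem.List.sorted
      ((l.foldl fdsGroup PySem.Dict.empty).values.flatMap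
        (fun idxs => (PySem.List.slice idxs (some 1) none).map
          (fun i => (i, PySem.List.pyGetD idxs 0 0)))) (fun p => p.1) = fdsD l := by
  have hvals : (l.foldl fdsGroup PySem.Dict.empty).values
      = (PySem.Set.ofList (l.map (·.2))).map (fun s => fdsGrp l s) := by
    rw [PySem.Dict.values_eq_map_keys _ (fds_positions_nodup l) ([] : List Int),
      fds_positions_keys]
    exact List.map_congr_left (fun s _ => fds_positions_getD l s)
  rw [hvals, List.flatMap_map]
  have hbody : (PySem.Set.ofList (l.map (·.2))).flatMap
        (fun s => (PySem.List.slice (fdsGrp l s) (some 1) none).map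
          (fun i => (i, PySem.List.pyGetD (fdsGrp l s) 0 0)))
      = (PySem.Set.ofList (l.map (·.2))).flatMap
        (fun s => ((l.filter (fun p => decide (fdsHead l p.2 ≠ p.1))).filter
            (fun p => p.2 == s)).map (fun p => (p.1, fdsHead l p.2))) := by
    rw [List.flatMap_def, List.flatMap_def]
    exact congrArg List.flatten (List.map_congr_left (fun s hs =>
      fds_body l hfst ((PySem.Set.mem_ofList _ _).mp hs)))
  rw [hbody, ← List.map_flatMap]
  have hperm : ((PySem.Set.ofList (l.map (·.2))).flatMap
      (fun s => (l.filter (fun p => decide (fdsHead l p.2 ≠ p.1))).filter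
        (fun p => p.2 == s))).Perm (l.filter (fun p => decide (fdsHead l p.2 ≠ p.1))) :=
    fds_perm_groups _ _
      (fun p hp => (PySem.Set.mem_ofList _ _).mpr
        (List.mem_map.mpr ⟨p, List.mem_of_mem_filter hp, rfl⟩))
      (PySem.Set.nodup_ofList _)
  have hpermD : (fdsD l).Perm
      (((PySem.Set.ofList (l.map (·.2))).flatMap
        (fun s => (l.filter (fun p => decide (fdsHead l p.2 ≠ p.1))).filter
          (fun p => p.2 == s))).map (fun p => (p.1, fdsHead l p.2))) := by
    unfold fdsD
    exact (hperm.map (fun p => (p.1, fdsHead l p.2))).symm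
  exact PySem.List.sorted_eq_of_perm_of_pairwise_lt _ _ _ hpermD (fds_fdsD_pairwise l hfst)

theorem fds_fdsD_nodup (l : List (Int × String)) (hfst : l.Pairwise (fun p q => p.1 < q.1)) :
    ((fdsD l).map (fun p => p.1)).Nodup :=
  (List.pairwise_map.mpr (fds_fdsD_pairwise l hfst)).imp ne_of_lt

-- ===== VERDICT (by name: the statement is the Claim_ definition above) =====
theorem find_duplicate_sequences_spec : Claim_equal_find_duplicate_sequences := by
  intro sequences _
  show find_duplicate_sequences sequences = find_duplicate_sequences_alt sequences
  have hpw := PySem.List.pairwise_lt_enumerate sequences 0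
  have hne : (PySem.List.enumerate sequences).Pairwise (fun p q => p.1 ≠ q.1) :=
    hpw.imp (fun h => ne_of_lt h)
  have hA : find_duplicate_sequences sequences
      = (fdsU (PySem.List.enumerate sequences), fdsD (PySem.List.enumerate sequences)) := by
    unfold find_duplicate_sequences
    rw [fds_main _ PySem.Dict.empty PySem.Dict.empty
        (by intro s j h; rw [PySem.Dict.get?_empty] at h; exact absurd h (by simp)) hne]
    exact Prod.ext (fds_pass1_items _) (fds_pass2_items _ hpw)
  have hB : find_duplicate_sequences_alt sequences
      = (fdsU (PySem.List.enumerate sequences), fdsD (PySem.List.enumerate sequences)) := by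
    simp only [find_duplicate_sequences_alt]
    rw [fds_b_dups _ hpw, fds_ofList_items _ (fds_fdsD_nodup _ hpw), fds_b_unique]
  rw [hA, hB]
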